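-- pv_equiv track=rewrite | github.com/Shindeshruti01/JanMitra | backend/app.py | build_suggested_action
-- ===== SOURCE A (Python) =====
-- def build_suggested_action(reasons):
--     reasons = reasons or []
--
--     if any("Age-DOB mismatch" in reason for reason in reasons):
--         return "Request updated proof and verify the DOB against the voter record."
--     if any("Invalid DOB" in reason for reason in reasons):
--         return "Check the submitted date of birth document and correct the voter profile if needed."
--     if any("Invalid placeholder name" in reason for reason in reasons):
--         return "Review the original source form and replace the placeholder name with the actual voter name."
--     if any("Name contains digits" in reason for reason in reasons):
--         return "Verify the voter name manually and correct any OCR or manual-entry issue."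
--     if any("Age out of valid range" in reason for reason in reasons):
--         return "Validate the voter age with DOB and registration proof before approval."
--
--     return "Review the full voter record manually and verify it against the submitted supporting documents."
-- ===== SOURCE B (Python) =====
-- def build_suggested_action(reasons):
--     table = [
--         ("Age-DOB mismatch", "Request updated proof and verify the DOB against the voter record."),
--         ("Invalid DOB", "Check the submitted date of birth document and correct the voter profile if needed."),
--         ("Invalid placeholder name", "Review the original source form and replace the placeholder name with the actual voter name."),
--         ("Name contains digits", "Verify the voter name manually and correct any OCR or manual-entry issue."),
--         ("Age out of valid range", "Validate the voter age with DOB and registration proof before approval."),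
--     ]
--     default = "Review the full voter record manually and verify it against the submitted supporting documents."
--     best = None
--     for reason in (reasons or []):
--         for i, (kw, _msg) in enumerate(table):
--             if kw in reason:
--                 if best is None or i < best:
--                     best = i
--                 break
--     return table[best][1] if best is not None else default
-- ===== Notes on version B (the rewrite author's own statement) =====
-- stated objective: simpler
-- what changed: Replaces five separate any()-scans over the reasons with a single pass that, per reason, finds its lowest-index keyword in an ordered priority table and tracks the global minimum matched index, returning that table entry's message (or the default).
import Mathlib
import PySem

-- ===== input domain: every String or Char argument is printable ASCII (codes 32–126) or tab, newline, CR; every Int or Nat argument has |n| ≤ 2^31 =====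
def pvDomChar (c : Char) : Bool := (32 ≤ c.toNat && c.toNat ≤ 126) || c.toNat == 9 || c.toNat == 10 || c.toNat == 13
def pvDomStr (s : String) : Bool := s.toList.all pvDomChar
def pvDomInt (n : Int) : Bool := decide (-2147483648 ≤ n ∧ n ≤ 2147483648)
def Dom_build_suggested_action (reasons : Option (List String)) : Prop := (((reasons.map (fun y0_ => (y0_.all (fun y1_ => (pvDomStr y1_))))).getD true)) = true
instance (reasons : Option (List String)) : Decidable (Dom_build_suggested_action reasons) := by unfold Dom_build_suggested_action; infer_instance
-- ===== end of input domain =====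

-- B replaces five separate any()-scans with one pass over the reasons against an ordered
-- (keyword, message) priority table, tracking the global minimum matched index (simpler decomposition).


-- ===== PORT A =====
def build_suggested_action (reasons : Option (List String)) : String :=
  let rs := reasons.getD []          -- reasons = reasons or []
  if rs.any (fun reason => PySem.Str.isIn "Age-DOB mismatch" reason) then
    "Request updated proof and verify the DOB against the voter record."
  else if rs.any (fun reason => PySem.Str.isIn "Invalid DOB" reason) then
    "Check the submitted date of birth document and correct the voter profile if needed."
  else if rs.any (fun reason => PySem.Str.isIn "Invalid placeholder name" reason) then
    "Review the original source form and replace the placeholder name with the actual voter name."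
  else if rs.any (fun reason => PySem.Str.isIn "Name contains digits" reason) then
    "Verify the voter name manually and correct any OCR or manual-entry issue."
  else if rs.any (fun reason => PySem.Str.isIn "Age out of valid range" reason) then
    "Validate the voter age with DOB and registration proof before approval."
  else
    "Review the full voter record manually and verify it against the submitted supporting documents."

-- ===== PORT B =====
def pvKwTable : List (String × String) :=
  [("Age-DOB mismatch", "Request updated proof and verify the DOB against the voter record."),
   ("Invalid DOB", "Check the submitted date of birth document and correct the voter profile if needed."),
   ("Invalid placeholder name", "Review the original source form and replace the placeholder name with the actual voter name."),
   ("Name contains digits", "Verify the voter name manually and correct any OCR or manual-entry issue."),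
   ("Age out of valid range", "Validate the voter age with DOB and registration proof before approval.")]

def pvDefaultMsg : String :=
  "Review the full voter record manually and verify it against the submitted supporting documents."

-- inner loop of B: first table index whose keyword occurs in the reason (the `break`)
def pvScanKw (reason : String) : List (String × String) → Nat → Option Nat
  | [], _ => none
  | (kw, _) :: rest, i => if PySem.Str.isIn kw reason then some i else pvScanKw reason rest (i + 1)

-- body of B's outer loop: update the running best (minimum matched index)
def pvStep (best : Option Nat) (reason : String) : Option Nat :=
  match pvScanKw reason pvKwTable 0 with
  | none => best
  | some i =>
    match best with
    | none => some i
    | some b => if i < b then some i else some b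

def build_suggested_action_alt (reasons : Option (List String)) : String :=
  match (reasons.getD []).foldl pvStep none with
  | none => pvDefaultMsg
  | some b => ((PySem.List.pyGet? pvKwTable (b : Int)).map Prod.snd).getD pvDefaultMsg
  -- table[best][1]: best always < 5 (pvScanKw returns indices of pvKwTable), so the getD default is unreachable

-- ===== PRECONDITION & SPEC =====
def Spec_build_suggested_action (reasons : Option (List String)) (out : String) : Prop := out = build_suggested_action_alt reasons
instance (reasons : Option (List String)) (out : String) : Decidable (Spec_build_suggested_action reasons out) := by unfold Spec_build_suggested_action; infer_instance

-- ===== CLAIM (what is proved, stated in full; the proofs are below) =====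
def Claim_equal_build_suggested_action : Prop := ∀ (reasons : Option (List String)), Dom_build_suggested_action reasons → Spec_build_suggested_action reasons (build_suggested_action reasons)

-- ===== LEMMAS AND PROOFS =====

def pvFind (r : String) : Option Nat := pvScanKw r pvKwTable 0

lemma pvFind_eq (r : String) : pvFind r =
    (if PySem.Str.isIn "Age-DOB mismatch" r then some 0
     else if PySem.Str.isIn "Invalid DOB" r then some 1
     else if PySem.Str.isIn "Invalid placeholder name" r then some 2
     else if PySem.Str.isIn "Name contains digits" r then some 3
     else if PySem.Str.isIn "Age out of valid range" r then some 4
     else none) := by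
  simp only [pvFind, pvScanKw, pvKwTable]


def pvOmin (a b : Option Nat) : Option Nat :=
  match b with
  | none => a
  | some i =>
    match a with
    | none => some i
    | some x => if i < x then some i else some x

lemma pvOmin_none_left (b : Option Nat) : pvOmin none b = b := by cases b <;> rfl

lemma pvOmin_none_right (a : Option Nat) : pvOmin a none = a := rfl

lemma pvOmin_some (x y : Nat) : pvOmin (some x) (some y) = some (min x y) := by
  simp only [pvOmin]; split_ifs <;> congr 1 <;> omega

lemma pvOmin_assoc (a b c : Option Nat) : pvOmin (pvOmin a b) c = pvOmin a (pvOmin b c) := by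
  rcases a with _ | x <;> rcases b with _ | y <;> rcases c with _ | z <;>
    (first
      | rfl
      | (simp only [pvOmin_some, pvOmin_none_left]
         all_goals first | rfl | (congr 1; omega)))

def pvFoldMin {α : Type} (f : α → Option Nat) (l : List α) : Option Nat :=
  l.foldl (fun acc r => pvOmin acc (f r)) none

lemma pvFoldMin_foldl {α : Type} (f : α → Option Nat) (l : List α) (acc : Option Nat) :
    l.foldl (fun acc r => pvOmin acc (f r)) acc = pvOmin acc (pvFoldMin f l) := by
  induction l generalizing acc with
  | nil => exact (pvOmin_none_right acc).symm
  | cons r t ih =>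
    show List.foldl _ (pvOmin acc (f r)) t = pvOmin acc (List.foldl _ (pvOmin none (f r)) t)
    rw [ih, ih, pvOmin_none_left, pvOmin_assoc]

lemma pvFoldMin_cons {α : Type} (f : α → Option Nat) (r : α) (t : List α) :
    pvFoldMin f (r :: t) = pvOmin (f r) (pvFoldMin f t) := by
  show List.foldl _ (pvOmin none (f r)) t = _
  rw [pvFoldMin_foldl, pvOmin_none_left]

lemma pvFoldMin_none {α : Type} {f : α → Option Nat} {l : List α}
    (h : pvFoldMin f l = none) : ∀ r ∈ l, f r = none := by
  induction l with
  | nil => intro r hr; cases hr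
  | cons r t ih =>
    rw [pvFoldMin_cons] at h
    intro r' hr'
    rcases List.mem_cons.mp hr' with hr' | hr'
    · subst hr'
      rcases hf : f r' with _ | i
      · rfl
      · exfalso
        rw [hf] at h
        rcases hg : pvFoldMin f t with _ | b <;> rw [hg] at h
        · cases h
        · rw [pvOmin_some] at h; cases h
    · rcases hf : f r with _ | i
      · rw [hf, pvOmin_none_left] at h
        exact ih h r' hr'
      · exfalso
        rw [hf] at h
        rcases hg : pvFoldMin f t with _ | b <;> rw [hg] at h
        · cases h
        · rw [pvOmin_some] at h; cases h

lemma pvFoldMin_mem {α : Type} {f : α → Option Nat} {l : List α} {j : Nat}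
    (h : pvFoldMin f l = some j) : ∃ r ∈ l, f r = some j := by
  induction l with
  | nil => cases h
  | cons r t ih =>
    rw [pvFoldMin_cons] at h
    rcases hf : f r with _ | i <;> rw [hf] at h
    · rw [pvOmin_none_left] at h
      obtain ⟨r', hr', h'⟩ := ih h
      exact ⟨r', List.mem_cons_of_mem _ hr', h'⟩
    · rcases hg : pvFoldMin f t with _ | b <;> rw [hg] at h
      · rw [pvOmin_none_right] at h
        exact ⟨r, List.mem_cons_self .., by rw [hf, h]⟩
      · rw [pvOmin_some] at h
        have hj : j = min i b := by injection h.symm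
        rcases Nat.le_total i b with hib | hib
        · exact ⟨r, List.mem_cons_self .., by rw [hf]; congr 1; omega⟩
        · obtain ⟨r', hr', h'⟩ := ih (by rw [hg]; congr 1; omega)
          exact ⟨r', List.mem_cons_of_mem _ hr', h'⟩

lemma pvFoldMin_min {α : Type} {f : α → Option Nat} {l : List α} {j : Nat}
    (h : pvFoldMin f l = some j) : ∀ r ∈ l, ∀ i, f r = some i → j ≤ i := by
  induction l generalizing j with
  | nil => intro r hr; cases hr
  | cons r t ih =>
    rw [pvFoldMin_cons] at h
    intro r' hr' i hi
    rcases List.mem_cons.mp hr' with hr' | hr'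
    · subst hr'
      rw [hi] at h
      rcases hg : pvFoldMin f t with _ | b <;> rw [hg] at h
      · rw [pvOmin_none_right] at h
        have : i = j := by injection h
        omega
      · rw [pvOmin_some] at h
        have : min i b = j := by injection h
        omega
    · rcases hg : pvFoldMin f t with _ | b
      · rw [pvFoldMin_none hg r' hr'] at hi; cases hi
      · have hb := ih hg r' hr' i hi
        rcases hf : f r with _ | x <;> rw [hf, hg] at h
        · rw [pvOmin_none_left] at h
          have : b = j := by injection h
          omega
        · rw [pvOmin_some] at h
          have : min x b = j := by injection h
          omega

lemma pvStep_eq (acc : Option Nat) (r : String) : pvStep acc r = pvOmin acc (pvFind r) := by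
  unfold pvStep pvOmin pvFind
  cases pvScanKw r pvKwTable 0 <;> cases acc <;> rfl

lemma pvG_eq (l : List String) : l.foldl pvStep none = pvFoldMin pvFind l := by
  have hstep : pvStep = fun acc r => pvOmin acc (pvFind r) :=
    funext fun acc => funext fun r => pvStep_eq acc r
  rw [hstep]; rfl

lemma pvFind_lt5 {r : String} {j : Nat} (h : pvFind r = some j) : j < 5 := by
  rw [pvFind_eq] at h
  split_ifs at h <;> injection h with h <;> omega

lemma pvFind_none_c {r : String} (h : pvFind r = none) :
    PySem.Str.isIn "Age-DOB mismatch" r = false ∧ PySem.Str.isIn "Invalid DOB" r = false ∧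
    PySem.Str.isIn "Invalid placeholder name" r = false ∧ PySem.Str.isIn "Name contains digits" r = false ∧
    PySem.Str.isIn "Age out of valid range" r = false := by
  rw [pvFind_eq] at h
  split_ifs at h with h0 h1 h2 h3 h4
  exact ⟨Bool.eq_false_iff.mpr h0, Bool.eq_false_iff.mpr h1, Bool.eq_false_iff.mpr h2,
         Bool.eq_false_iff.mpr h3, Bool.eq_false_iff.mpr h4⟩

lemma pvFind0_c {r : String} (h : pvFind r = some 0) : PySem.Str.isIn "Age-DOB mismatch" r = true := by
  rw [pvFind_eq] at h
  split_ifs at h <;> first | assumption | (injection h with h; omega)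
lemma pvFind1_c {r : String} (h : pvFind r = some 1) : PySem.Str.isIn "Invalid DOB" r = true := by
  rw [pvFind_eq] at h
  split_ifs at h <;> first | assumption | (injection h with h; omega)
lemma pvFind2_c {r : String} (h : pvFind r = some 2) : PySem.Str.isIn "Invalid placeholder name" r = true := by
  rw [pvFind_eq] at h
  split_ifs at h <;> first | assumption | (injection h with h; omega)
lemma pvFind3_c {r : String} (h : pvFind r = some 3) : PySem.Str.isIn "Name contains digits" r = true := by
  rw [pvFind_eq] at h
  split_ifs at h <;> first | assumption | (injection h with h; omega)
lemma pvFind4_c {r : String} (h : pvFind r = some 4) : PySem.Str.isIn "Age out of valid range" r = true := by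
  rw [pvFind_eq] at h
  split_ifs at h <;> first | assumption | (injection h with h; omega)

lemma c0_find {r : String} (h : PySem.Str.isIn "Age-DOB mismatch" r = true) :
    ∃ k ≤ 0, pvFind r = some k := by
  exact ⟨0, Nat.le_refl 0, by rw [pvFind_eq, if_pos h]⟩
lemma c1_find {r : String} (h : PySem.Str.isIn "Invalid DOB" r = true) : ∃ k ≤ 1, pvFind r = some k := by
  rw [pvFind_eq]
  split_ifs <;> first | exact ⟨0, by omega, rfl⟩ | exact ⟨1, by omega, rfl⟩
lemma c2_find {r : String} (h : PySem.Str.isIn "Invalid placeholder name" r = true) : ∃ k ≤ 2, pvFind r = some k := by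
  rw [pvFind_eq]
  split_ifs <;> first | exact ⟨0, by omega, rfl⟩ | exact ⟨1, by omega, rfl⟩ | exact ⟨2, by omega, rfl⟩
lemma c3_find {r : String} (h : PySem.Str.isIn "Name contains digits" r = true) : ∃ k ≤ 3, pvFind r = some k := by
  rw [pvFind_eq]
  split_ifs <;> first | exact ⟨0, by omega, rfl⟩ | exact ⟨1, by omega, rfl⟩ | exact ⟨2, by omega, rfl⟩ | exact ⟨3, by omega, rfl⟩


-- an any() over rs is false when the minimum matched index j is below every index kw can match at
lemma any_false_of_min {rs : List String} {j : Nat} (h : pvFoldMin pvFind rs = some j)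
    (kw : String) (hk : ∀ r : String, PySem.Str.isIn kw r = true → ∃ k, k < j ∧ pvFind r = some k) :
    rs.any (fun reason => PySem.Str.isIn kw reason) = false := by
  cases hb : rs.any (fun reason => PySem.Str.isIn kw reason) with
  | false => rfl
  | true =>
    exfalso
    obtain ⟨r, hr, hc⟩ := List.any_eq_true.mp hb
    obtain ⟨k, hkj, hfk⟩ := hk r hc
    have := pvFoldMin_min h r hr k hfk
    omega

-- A-chain = B-fold, for a plain reason list (both sides are the zeta-reduced bodies of the two ports)
lemma pvKey (rs : List String) :
    (if rs.any (fun reason => PySem.Str.isIn "Age-DOB mismatch" reason) then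
      "Request updated proof and verify the DOB against the voter record."
    else if rs.any (fun reason => PySem.Str.isIn "Invalid DOB" reason) then
      "Check the submitted date of birth document and correct the voter profile if needed."
    else if rs.any (fun reason => PySem.Str.isIn "Invalid placeholder name" reason) then
      "Review the original source form and replace the placeholder name with the actual voter name."
    else if rs.any (fun reason => PySem.Str.isIn "Name contains digits" reason) then
      "Verify the voter name manually and correct any OCR or manual-entry issue."
    else if rs.any (fun reason => PySem.Str.isIn "Age out of valid range" reason) then
      "Validate the voter age with DOB and registration proof before approval."
    else
      "Review the full voter record manually and verify it against the submitted supporting documents.") =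
    (match rs.foldl pvStep none with
     | none => pvDefaultMsg
     | some b => ((PySem.List.pyGet? pvKwTable (b : Int)).map Prod.snd).getD pvDefaultMsg) := by
  rw [pvG_eq]
  cases h : pvFoldMin pvFind rs with
  | none =>
    have hn := pvFoldMin_none h
    have b0 : rs.any (fun reason => PySem.Str.isIn "Age-DOB mismatch" reason) = false := by
      cases hb : rs.any (fun reason => PySem.Str.isIn "Age-DOB mismatch" reason) with
      | false => rfl
      | true =>
        exfalso
        obtain ⟨r, hr, hc⟩ := List.any_eq_true.mp hb
        have hc' : PySem.Str.isIn "Age-DOB mismatch" r = true := hc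
        rw [(pvFind_none_c (hn r hr)).1] at hc'
        cases hc'
    have b1 : rs.any (fun reason => PySem.Str.isIn "Invalid DOB" reason) = false := by
      cases hb : rs.any (fun reason => PySem.Str.isIn "Invalid DOB" reason) with
      | false => rfl
      | true =>
        exfalso
        obtain ⟨r, hr, hc⟩ := List.any_eq_true.mp hb
        have hc' : PySem.Str.isIn "Invalid DOB" r = true := hc
        rw [(pvFind_none_c (hn r hr)).2.1] at hc'
        cases hc'
    have b2 : rs.any (fun reason => PySem.Str.isIn "Invalid placeholder name" reason) = false := by
      cases hb : rs.any (fun reason => PySem.Str.isIn "Invalid placeholder name" reason) with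
      | false => rfl
      | true =>
        exfalso
        obtain ⟨r, hr, hc⟩ := List.any_eq_true.mp hb
        have hc' : PySem.Str.isIn "Invalid placeholder name" r = true := hc
        rw [(pvFind_none_c (hn r hr)).2.2.1] at hc'
        cases hc'
    have b3 : rs.any (fun reason => PySem.Str.isIn "Name contains digits" reason) = false := by
      cases hb : rs.any (fun reason => PySem.Str.isIn "Name contains digits" reason) with
      | false => rfl
      | true =>
        exfalso
        obtain ⟨r, hr, hc⟩ := List.any_eq_true.mp hb
        have hc' : PySem.Str.isIn "Name contains digits" r = true := hc
        rw [(pvFind_none_c (hn r hr)).2.2.2.1] at hc'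
        cases hc'
    have b4 : rs.any (fun reason => PySem.Str.isIn "Age out of valid range" reason) = false := by
      cases hb : rs.any (fun reason => PySem.Str.isIn "Age out of valid range" reason) with
      | false => rfl
      | true =>
        exfalso
        obtain ⟨r, hr, hc⟩ := List.any_eq_true.mp hb
        have hc' : PySem.Str.isIn "Age out of valid range" r = true := hc
        rw [(pvFind_none_c (hn r hr)).2.2.2.2] at hc'
        cases hc'
    rw [b0, b1, b2, b3, b4]
    rfl
  | some j =>
    obtain ⟨r, hr, hfr⟩ := pvFoldMin_mem h
    have hj : j < 5 := pvFind_lt5 hfr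
    interval_cases j
    · have b0 : rs.any (fun reason => PySem.Str.isIn "Age-DOB mismatch" reason) = true :=
        List.any_eq_true.mpr ⟨r, hr, pvFind0_c hfr⟩
      rw [b0]; rfl
    · have b0 := any_false_of_min h "Age-DOB mismatch"
        (fun r' hc => by obtain ⟨k, hk, hf⟩ := c0_find hc; exact ⟨k, by omega, hf⟩)
      have b1 : rs.any (fun reason => PySem.Str.isIn "Invalid DOB" reason) = true :=
        List.any_eq_true.mpr ⟨r, hr, pvFind1_c hfr⟩
      rw [b0, b1]; rfl
    · have b0 := any_false_of_min h "Age-DOB mismatch"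
        (fun r' hc => by obtain ⟨k, hk, hf⟩ := c0_find hc; exact ⟨k, by omega, hf⟩)
      have b1 := any_false_of_min h "Invalid DOB"
        (fun r' hc => by obtain ⟨k, hk, hf⟩ := c1_find hc; exact ⟨k, by omega, hf⟩)
      have b2 : rs.any (fun reason => PySem.Str.isIn "Invalid placeholder name" reason) = true :=
        List.any_eq_true.mpr ⟨r, hr, pvFind2_c hfr⟩
      rw [b0, b1, b2]; rfl
    · have b0 := any_false_of_min h "Age-DOB mismatch"
        (fun r' hc => by obtain ⟨k, hk, hf⟩ := c0_find hc; exact ⟨k, by omega, hf⟩)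
      have b1 := any_false_of_min h "Invalid DOB"
        (fun r' hc => by obtain ⟨k, hk, hf⟩ := c1_find hc; exact ⟨k, by omega, hf⟩)
      have b2 := any_false_of_min h "Invalid placeholder name"
        (fun r' hc => by obtain ⟨k, hk, hf⟩ := c2_find hc; exact ⟨k, by omega, hf⟩)
      have b3 : rs.any (fun reason => PySem.Str.isIn "Name contains digits" reason) = true :=
        List.any_eq_true.mpr ⟨r, hr, pvFind3_c hfr⟩
      rw [b0, b1, b2, b3]; rfl
    · have b0 := any_false_of_min h "Age-DOB mismatch"
        (fun r' hc => by obtain ⟨k, hk, hf⟩ := c0_find hc; exact ⟨k, by omega, hf⟩)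
      have b1 := any_false_of_min h "Invalid DOB"
        (fun r' hc => by obtain ⟨k, hk, hf⟩ := c1_find hc; exact ⟨k, by omega, hf⟩)
      have b2 := any_false_of_min h "Invalid placeholder name"
        (fun r' hc => by obtain ⟨k, hk, hf⟩ := c2_find hc; exact ⟨k, by omega, hf⟩)
      have b3 := any_false_of_min h "Name contains digits"
        (fun r' hc => by obtain ⟨k, hk, hf⟩ := c3_find hc; exact ⟨k, by omega, hf⟩)
      have b4 : rs.any (fun reason => PySem.Str.isIn "Age out of valid range" reason) = true :=
        List.any_eq_true.mpr ⟨r, hr, pvFind4_c hfr⟩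
      rw [b0, b1, b2, b3, b4]; rfl

-- ===== VERDICT (by name: the statement is the Claim_ definition above) =====
theorem build_suggested_action_spec : Claim_equal_build_suggested_action := by
  intro reasons _
  exact pvKey (reasons.getD [])
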